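-- pv_equiv track=rewrite | github.com/wnwkr13/KW_Datareader_UI_version | num_change/num_change.py | get_kor_amount_string
-- ===== SOURCE A (Python) =====
-- def get_kor_amount_string(num_amount, ndigits_round=0, str_suffix='원'):
--     """숫자를 자릿수 한글단위와 함께 리턴한다 """
--     assert isinstance(num_amount, int) and isinstance(ndigits_round, int)
--     assert num_amount >= 1, '최소 1원 이상 입력되어야 합니다'
--     ## 일, 십, 백, 천, 만, 십, 백, 천, 억, ... 단위 리스트를 만든다.
--     maj_units = ['만', '억', '조', '경', '해', '자', '양', '구', '간', '정', '재', '극']  # 10000 단위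
--     units = [' ']  # 시작은 일의자리로 공백으로하고 이후 십, 백, 천, 만...
--     for mm in maj_units:
--         units.extend(['십', '백', '천'])  # 중간 십,백,천 단위
--         units.append(mm)
--
--     list_amount = list(str(round(num_amount, ndigits_round)))  # 라운딩한 숫자를 리스트로 바꾼다
--     list_amount.reverse()  # 일, 십 순서로 읽기 위해 순서를 뒤집는다
--
--     str_result = ''  # 결과
--     num_len_list_amount = len(list_amount)
--
--     for i in range(num_len_list_amount):
--         str_num = list_amount[i]
--         # 만, 억, 조 단위에 천, 백, 십, 일이 모두 0000 일때는 생략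
--         if num_len_list_amount >= 9 and i >= 4 and i % 4 == 0 and ''.join(list_amount[i:i + 4]) == '0000':
--             continue
--         if str_num == '0':  # 0일 때
--             if i % 4 == 0:  # 4번째자리일 때(만, 억, 조...)
--                 str_result = units[i] + str_result  # 단위만 붙인다
--         elif str_num == '1':  # 1일 때
--             if i % 4 == 0:  # 4번째자리일 때(만, 억, 조...)
--                 str_result = str_num + units[i] + str_result  # 숫자와 단위를 붙인다
--             else:  # 나머지자리일 때
--                 str_result = units[i] + str_result  # 단위만 붙인다
--         else:  # 2~9일 때
--             str_result = str_num + units[i] + str_result  # 숫자와 단위를 붙인다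
--     str_result = str_result.strip()  # 문자열 앞뒤 공백을 제거한다
--     if len(str_result) == 0:
--         return None
--     if not str_result[0].isnumeric():  # 앞이 숫자가 아닌 문자인 경우
--         str_result = '1' + str_result  # 1을 붙인다
--     return str_result + str_suffix  # 접미사를 붙인다
-- ===== SOURCE B (Python) =====
-- def _kor_group(g, grp):
--     """Render one 4-digit (or shorter, topmost) group: local 십/백/천 reading + major unit."""
--     majs = [' ', '만', '억', '조', '경', '해', '자', '양', '구', '간', '정', '재', '극']
--     minors = ['', '십', '백', '천']
--     piece = ''
--     L = len(grp)
--     for j, d in enumerate(grp):      # most significant digit of the group first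
--         pos = L - 1 - j              # 0 = group-unit position (일/만/억/...)
--         if pos == 0:
--             piece += majs[g] if d == '0' else d + majs[g]
--         elif d != '0':
--             piece += minors[pos] if d == '1' else d + minors[pos]
--     return piece
--
--
-- def get_kor_amount_string(num_amount, ndigits_round=0, str_suffix='원'):
--     """숫자를 자릿수 한글단위와 함께 리턴한다 (group-of-4 decomposition)"""
--     s = str(round(num_amount, ndigits_round))
--     n = len(s)
--     # stage 1: cut the digit string into 4-digit groups, least significant group first
--     groups = []
--     t = s
--     while t:
--         groups.append(t[-4:])
--         t = t[:-4]
--     # stage 2: render groups, most significant first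
--     out = []
--     for g, grp in reversed(list(enumerate(groups))):
--         if g >= 1 and n >= 9 and grp == '0000':
--             continue                 # an all-zero group is suppressed entirely
--         out.append(_kor_group(g, grp))
--     res = ''.join(out).strip()
--     if not res:
--         return None
--     if not res[0].isnumeric():
--         res = '1' + res
--     return res + str_suffix
-- ===== Notes on version B (the rewrite author's own statement) =====
-- stated objective: alternative
-- what changed: A reverses the digit list and runs one flat per-digit loop that prepends chunks and tests the 0000-block by slicing at every fourth index; B is a two-stage group decomposition: it first cuts the digit string into 4-digit groups (일/만/억/... blocks), then renders each group locally (inner 십/백/천 reading plus the group's major unit), suppressing an all-zero group wholesale, and joins the group strings once.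
import Mathlib
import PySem

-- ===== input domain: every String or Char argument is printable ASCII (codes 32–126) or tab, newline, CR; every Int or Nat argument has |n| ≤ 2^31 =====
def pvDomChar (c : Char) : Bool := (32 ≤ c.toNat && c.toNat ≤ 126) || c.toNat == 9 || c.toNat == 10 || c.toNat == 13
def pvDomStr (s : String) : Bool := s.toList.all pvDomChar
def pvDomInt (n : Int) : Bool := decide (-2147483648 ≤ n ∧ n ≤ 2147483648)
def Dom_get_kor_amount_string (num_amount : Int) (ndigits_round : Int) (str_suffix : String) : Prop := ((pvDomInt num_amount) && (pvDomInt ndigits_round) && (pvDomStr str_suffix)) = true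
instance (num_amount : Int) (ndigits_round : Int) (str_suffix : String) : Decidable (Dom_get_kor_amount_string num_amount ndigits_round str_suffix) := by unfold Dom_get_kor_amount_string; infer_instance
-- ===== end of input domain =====

-- B replaces A's flat reversed-digit loop with a two-stage group decomposition: cut the digit
-- string into 4-digit groups, then render each group locally (objective: alternative).

-- Shared port of the BUILTIN round(n, ndigits) for ints (banker's rounding to a multiple of
-- 10^(-ndigits)); round is a Python builtin, so it is ported by its contract. The exponent is
-- capped at 11, which is exact for |n| ≤ 2^31 (every input in Dom): any modulus ≥ 10^11
-- already rounds such an n to 0, as does 10^11 itself.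
def pvKorRound (n : Int) (nd : Int) : Int :=
  if 0 ≤ nd then n
  else
    let k : Nat := min (-nd).toNat 11
    let m : Int := 10 ^ k
    let q : Int := PySem.Int.floordiv n m
    let r : Int := n - q * m
    let q' : Int :=
      if m < 2 * r then q + 1
      else if 2 * r < m then q
      else if q % 2 = 0 then q else q + 1
    q' * m

-- ===== PORT A =====
-- A-side helper: the units table A builds by extending/appending per major unit.
def korUnitsA : List (List Char) :=
  [['만'],['억'],['조'],['경'],['해'],['자'],['양'],['구'],['간'],['정'],['재'],['극']].foldl
    (fun u mm => (u ++ [['십'],['백'],['천']]) ++ [mm]) [[' ']]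

-- A-side helper: one iteration of A's loop body (prepends onto the accumulator).
def korStepA (L : List Char) (n : Int) (acc : List Char) (i : Int) : List Char :=
  let str_num : Char := PySem.List.pyGetD L i ' '   -- L[i]; i is always in range
  if 9 ≤ n ∧ 4 ≤ i ∧ PySem.Int.mod i 4 = 0 ∧
      PySem.List.slice L (some i) (some (i + 4)) = ['0','0','0','0'] then acc
  else if str_num = '0' then
    (if PySem.Int.mod i 4 = 0 then PySem.List.pyGetD korUnitsA i [] ++ acc else acc)
  else if str_num = '1' then
    (if PySem.Int.mod i 4 = 0 then str_num :: (PySem.List.pyGetD korUnitsA i [] ++ acc)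
     else PySem.List.pyGetD korUnitsA i [] ++ acc)
  else str_num :: (PySem.List.pyGetD korUnitsA i [] ++ acc)

def get_kor_amount_string (num_amount : Int) (ndigits_round : Int) (str_suffix : String) : Option String :=
  -- the asserts (num_amount ≥ 1) raise outside Pre_; inside Pre_ they pass
  let list_amount : List Char := (PySem.Int.toChars (pvKorRound num_amount ndigits_round)).reverse
  let n : Int := (list_amount.length : Int)
  let str_result : List Char := (PySem.List.pyRange 0 n 1).foldl (korStepA list_amount n) []
  let str_result := PySem.Chars.strip str_result
  if str_result.length = 0 then none
  else
    -- str.isnumeric coincides with isdigit on every char that can occur here (ASCII digits and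
    -- the fixed Korean unit chars)
    let str_result := if ¬ (PySem.Chars.isdigit (str_result.headD ' ')) then '1' :: str_result else str_result
    some (String.ofList (str_result ++ str_suffix.toList))

-- ===== PORT B =====
def korMajsB : List (List Char) :=
  [[' '],['만'],['억'],['조'],['경'],['해'],['자'],['양'],['구'],['간'],['정'],['재'],['극']]
def korMinorsB : List (List Char) := [[],['십'],['백'],['천']]

-- B-side helper: one iteration of _kor_group's inner loop (piece += …).
def korGroupStep (g : Int) (L : Int) (piece : List Char) (p : Int × Char) : List Char :=
  let j := p.1
  let d := p.2
  let pos : Int := L - 1 - j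
  if pos = 0 then
    piece ++ (if d = '0' then PySem.List.pyGetD korMajsB g []
              else d :: PySem.List.pyGetD korMajsB g [])
  else if d ≠ '0' then
    piece ++ (if d = '1' then PySem.List.pyGetD korMinorsB pos []
              else d :: PySem.List.pyGetD korMinorsB pos [])
  else piece

-- B-side helper: _kor_group(g, grp) — local reading of one group plus its major unit.
def korGroupRender (g : Int) (grp : List Char) : List Char :=
  (PySem.List.enumerate grp 0).foldl (korGroupStep g (grp.length : Int)) []

-- B-side helper: the grouping while-loop (t[-4:] peeled off until t is empty).
def korGroups (t : List Char) : List (List Char) :=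
  if t = [] then []
  else PySem.List.slice t (some (-4)) none :: korGroups (PySem.List.slice t none (some (-4)))
termination_by t.length
decreasing_by
  rename_i h
  rw [PySem.List.slice_to_neg_ofNat t 4 (by omega)]
  have : t.length ≠ 0 := by simpa using h
  simp [List.length_take]
  omega

-- B-side helper: one iteration of the outer group loop.
def korOuterStep (n : Int) (out : List (List Char)) (p : Int × List Char) : List (List Char) :=
  let g := p.1
  let grp := p.2
  if 1 ≤ g ∧ 9 ≤ n ∧ grp = ['0','0','0','0'] then out
  else out ++ [korGroupRender g grp]

def get_kor_amount_string_alt (num_amount : Int) (ndigits_round : Int) (str_suffix : String) : Option String :=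
  let s : List Char := PySem.Int.toChars (pvKorRound num_amount ndigits_round)
  let n : Int := (s.length : Int)
  let groups : List (List Char) := korGroups s
  let out : List (List Char) :=
    ((PySem.List.enumerate groups 0).reverse).foldl (korOuterStep n) []
  let res : List Char := PySem.Chars.strip (PySem.Chars.join [] out)   -- ''.join(out).strip()
  if res = [] then none
  else
    -- isnumeric = isdigit on the chars that occur here, as in port A
    let res := if ¬ (PySem.Chars.isdigit (res.headD ' ')) then '1' :: res else res
    some (String.ofList (res ++ str_suffix.toList))

-- ===== PRECONDITION & SPEC =====
-- Pre_ excludes exactly the inputs where A's 'assert num_amount >= 1' raises AssertionError.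
def Pre_get_kor_amount_string (num_amount : Int) (ndigits_round : Int) (str_suffix : String) : Prop :=
  1 ≤ num_amount
instance (num_amount : Int) (ndigits_round : Int) (str_suffix : String) : Decidable (Pre_get_kor_amount_string num_amount ndigits_round str_suffix) := by unfold Pre_get_kor_amount_string; infer_instance

def pvWitness_get_kor_amount_string : Int × Int × String := (123456789, -2, "won")

def Spec_get_kor_amount_string (num_amount : Int) (ndigits_round : Int) (str_suffix : String) (out : Option String) : Prop := out = get_kor_amount_string_alt num_amount ndigits_round str_suffix
instance (num_amount : Int) (ndigits_round : Int) (str_suffix : String) (out : Option String) : Decidable (Spec_get_kor_amount_string num_amount ndigits_round str_suffix out) := by unfold Spec_get_kor_amount_string; infer_instance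

-- ===== CLAIM (what is proved, stated in full; the proofs are below) =====
def Claim_equal_get_kor_amount_string : Prop := ∀ (num_amount : Int) (ndigits_round : Int) (str_suffix : String), Dom_get_kor_amount_string num_amount ndigits_round str_suffix → Pre_get_kor_amount_string num_amount ndigits_round str_suffix → Spec_get_kor_amount_string num_amount ndigits_round str_suffix (get_kor_amount_string num_amount ndigits_round str_suffix)

-- ===== LEMMAS AND PROOFS =====

-- A's chunk for position i (what korStepA prepends).
def korPieceA (L : List Char) (n : Int) (i : Int) : List Char :=
  let str_num : Char := PySem.List.pyGetD L i ' '
  if 9 ≤ n ∧ 4 ≤ i ∧ PySem.Int.mod i 4 = 0 ∧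
      PySem.List.slice L (some i) (some (i + 4)) = ['0','0','0','0'] then []
  else if str_num = '0' then
    (if PySem.Int.mod i 4 = 0 then PySem.List.pyGetD korUnitsA i [] else [])
  else if str_num = '1' then
    (if PySem.Int.mod i 4 = 0 then str_num :: PySem.List.pyGetD korUnitsA i []
     else PySem.List.pyGetD korUnitsA i [])
  else str_num :: PySem.List.pyGetD korUnitsA i []

-- the per-digit chunk in PRINT order (the common reference both programs are reduced to)
def kPiece (s : List Char) (n : Int) (p : Int × Char) : List Char :=
  let idx := p.1
  let d := p.2
  let i : Int := n - 1 - idx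
  if 9 ≤ n ∧ 4 ≤ i ∧ PySem.Int.mod i 4 = 0 ∧ 3 ≤ idx ∧
      PySem.List.slice s (some (idx - 3)) (some (idx + 1)) = ['0','0','0','0'] then []
  else if PySem.Int.mod i 4 = 0 then
    (if d = '0' then PySem.List.pyGetD korMajsB (PySem.Int.floordiv i 4) []
     else d :: PySem.List.pyGetD korMajsB (PySem.Int.floordiv i 4) [])
  else if d ≠ '0' then
    (if d = '1' then PySem.List.pyGetD korMinorsB (PySem.Int.mod i 4) []
     else d :: PySem.List.pyGetD korMinorsB (PySem.Int.mod i 4) [])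
  else []

-- B's inner per-digit chunk (what korGroupStep appends).
def iPiece (g : Int) (L : Int) (p : Int × Char) : List Char :=
  let pos : Int := L - 1 - p.1
  if pos = 0 then
    (if p.2 = '0' then PySem.List.pyGetD korMajsB g []
     else p.2 :: PySem.List.pyGetD korMajsB g [])
  else if p.2 ≠ '0' then
    (if p.2 = '1' then PySem.List.pyGetD korMinorsB pos []
     else p.2 :: PySem.List.pyGetD korMinorsB pos [])
  else []

-- B's chunk for one group (what one outer-loop iteration contributes).
def gPiece (n : Int) (p : Int × List Char) : List Char :=
  if 1 ≤ p.1 ∧ 9 ≤ n ∧ p.2 = ['0','0','0','0'] then []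
  else korGroupRender p.1 p.2

lemma korStepA_eq (L : List Char) (n : Int) (acc : List Char) (i : Int) :
    korStepA L n acc i = korPieceA L n i ++ acc := by
  unfold korStepA korPieceA
  by_cases h1 : 9 ≤ n ∧ 4 ≤ i ∧ PySem.Int.mod i 4 = 0 ∧
      PySem.List.slice L (some i) (some (i + 4)) = ['0','0','0','0'] <;>
    by_cases h2 : PySem.List.pyGetD L i ' ' = '0' <;>
    by_cases h3 : PySem.List.pyGetD L i ' ' = '1' <;>
    by_cases h4 : PySem.Int.mod i 4 = 0 <;>
    simp [h1, h2, h3, h4] <;> simp_all <;> split <;> simp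

lemma korGroupStep_eq (g L : Int) (piece : List Char) (p : Int × Char) :
    korGroupStep g L piece p = piece ++ iPiece g L p := by
  cases p with
  | mk j d =>
    simp only [korGroupStep, iPiece]
    split_ifs <;> simp

lemma korOuterStep_eq (n : Int) (out : List (List Char)) (p : Int × List Char) :
    korOuterStep n out p =
      out ++ (if 1 ≤ p.1 ∧ 9 ≤ n ∧ p.2 = ['0','0','0','0'] then [] else [korGroupRender p.1 p.2]) := by
  cases p with
  | mk g grp =>
    simp only [korOuterStep]
    split_ifs <;> simp

lemma foldl_prepend {α β : Type} (f : α → List β) (l : List α) (acc : List β) :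
    l.foldl (fun acc x => f x ++ acc) acc = ((l.map f).reverse).flatten ++ acc := by
  induction l generalizing acc with
  | nil => simp
  | cons x t ih => simp [ih, List.flatten_append]

lemma join_nil_eq_flatten (parts : List (List Char)) :
    PySem.Chars.join [] parts = parts.flatten := by
  induction parts with
  | nil => simp [PySem.Chars.join_nil]
  | cons a t ih =>
    cases t with
    | nil => simp [PySem.Chars.join_singleton]
    | cons b u => rw [PySem.Chars.join_cons_cons]; simp [ih]

-- Int mod/floordiv on casts of naturals (positive divisor)
lemma korModNat (i : Nat) : PySem.Int.mod (i : Int) 4 = ((i % 4 : Nat) : Int) := by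
  simp [PySem.Int.mod, Int.fmod_eq_emod]
lemma korDivNat (i : Nat) : PySem.Int.floordiv (i : Int) 4 = ((i / 4 : Nat) : Int) := by
  simp [PySem.Int.floordiv, Int.fdiv_eq_ediv]

-- A's units table agrees with B's two tables at every index the proof meets
lemma korUnits_eq : ∀ i : Nat, i < 49 →
    PySem.List.pyGetD korUnitsA (i : Int) [] =
      (if i % 4 = 0 then PySem.List.pyGetD korMajsB ((i / 4 : Nat) : Int) []
       else PySem.List.pyGetD korMinorsB ((i % 4 : Nat) : Int) []) := by
  decide

-- the two '0000'-group tests are the same test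
lemma korSlice_agree (cs : List Char) (k : Nat) (hk : k < cs.length)
    (h4 : 4 ≤ cs.length - 1 - k) :
    (PySem.List.slice cs.reverse (some ((cs.length - 1 - k : Nat) : Int))
        (some (((cs.length - 1 - k : Nat) : Int) + 4)) = ['0','0','0','0'])
      ↔ (3 ≤ (k : Int) ∧
         PySem.List.slice cs (some ((k : Int) - 3)) (some ((k : Int) + 1)) = ['0','0','0','0']) := by
  set n := cs.length with hn
  set i := n - 1 - k with hi
  have e1 : PySem.List.slice cs.reverse (some (i : Int)) (some ((i : Int) + 4))
      = (cs.reverse.drop i).take 4 := by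
    have := PySem.List.slice_natCast_add cs.reverse i 4
    push_cast at this
    exact this
  have e0 : cs.reverse.drop i = (cs.take (k + 1)).reverse := by
    have := List.reverse_drop (l := cs.reverse) (i := i)
    rw [List.reverse_reverse] at this
    have h2 : cs.reverse.length - i = k + 1 := by simp; omega
    rw [h2] at this
    rw [← List.reverse_reverse (cs.reverse.drop i), this]
  by_cases h3 : 3 ≤ k
  · have e2 : PySem.List.slice cs (some ((k : Int) - 3)) (some ((k : Int) + 1))
        = (cs.drop (k - 3)).take 4 := by
      have := PySem.List.slice_natCast_add cs (k - 3) 4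
      push_cast [h3] at this
      have hc : ((k : Int) - 3 + 4) = (k : Int) + 1 := by ring
      rw [hc] at this
      exact this
    have e3 : (cs.reverse.drop i).take 4 = ((cs.drop (k - 3)).take 4).reverse := by
      rw [e0, List.take_reverse]
      congr 1
      rw [List.length_take]
      have hmin : min (k + 1) n = k + 1 := by omega
      rw [hmin]
      have : k + 1 - 4 = k - 3 := by omega
      rw [this, List.drop_take]
      congr 1
      omega
    rw [e1, e3]
    constructor
    · intro h
      refine ⟨by exact_mod_cast h3, ?_⟩
      rw [e2]
      have := congrArg List.reverse h
      simpa using this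
    · rintro ⟨-, h⟩
      rw [e2] at h
      rw [h]
      decide
  · constructor
    · intro h
      exfalso
      rw [e1, e0] at h
      have hlen := congrArg List.length h
      simp [List.length_take] at hlen
      omega
    · rintro ⟨h, -⟩
      omega

-- pointwise agreement of A's reversed-position piece with the print-order piece
lemma korPiece_agree (cs : List Char) (k : Nat) (hk : k < cs.length) (hlen : cs.length ≤ 49) :
    korPieceA cs.reverse (cs.length : Int) ((cs.length - 1 - k : Nat) : Int)
      = kPiece cs (cs.length : Int) ((k : Int), PySem.List.pyGetD cs (k : Int) ' ') := by
  set n := cs.length with hn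
  set i := n - 1 - k with hi
  have hi49 : i < 49 := by omega
  have hd : PySem.List.pyGetD cs.reverse (i : Int) ' ' = PySem.List.pyGetD cs (k : Int) ' ' := by
    rw [PySem.List.pyGetD_natCast, PySem.List.pyGetD_natCast]
    rw [List.getD_eq_getElem?_getD, List.getD_eq_getElem?_getD]
    rw [List.getElem?_reverse (by simpa using by omega)]
    congr 2
    omega
  have hiB : (n : Int) - 1 - (k : Int) = (i : Int) := by push_cast; omega
  simp only [korPieceA, kPiece, hiB, hd, korModNat, korDivNat]
  have hcond : (9 ≤ (n : Int) ∧ 4 ≤ (i : Int) ∧ ((i % 4 : Nat) : Int) = 0 ∧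
        PySem.List.slice cs.reverse (some (i : Int)) (some ((i : Int) + 4)) = ['0','0','0','0'])
      ↔ (9 ≤ (n : Int) ∧ 4 ≤ (i : Int) ∧ ((i % 4 : Nat) : Int) = 0 ∧ 3 ≤ (k : Int) ∧
        PySem.List.slice cs (some ((k : Int) - 3)) (some ((k : Int) + 1)) = ['0','0','0','0']) := by
    by_cases hc4 : 4 ≤ i
    · have hs := korSlice_agree cs k hk (by omega)
      constructor
      · rintro ⟨a, b, c, d⟩
        obtain ⟨d1, d2⟩ := hs.mp d
        exact ⟨a, b, c, d1, d2⟩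
      · rintro ⟨a, b, c, d1, d2⟩
        exact ⟨a, b, c, hs.mpr ⟨d1, d2⟩⟩
    · have : ¬ (4 ≤ (i : Int)) := by exact_mod_cast hc4
      constructor
      · rintro ⟨-, b, -⟩; exact absurd b this
      · rintro ⟨-, b, -⟩; exact absurd b this
  by_cases hC : 9 ≤ (n : Int) ∧ 4 ≤ (i : Int) ∧ ((i % 4 : Nat) : Int) = 0 ∧
      PySem.List.slice cs.reverse (some (i : Int)) (some ((i : Int) + 4)) = ['0','0','0','0']
  · rw [if_pos hC, if_pos (hcond.mp hC)]
  · rw [if_neg hC, if_neg (fun h => hC (hcond.mpr h))]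
    have hu := korUnits_eq i hi49
    by_cases hm : i % 4 = 0
    · have hm' : ((i % 4 : Nat) : Int) = 0 := by exact_mod_cast hm
      rw [hm] at hu
      simp only [if_pos rfl] at hu
      simp only [hm', if_pos rfl, hu]
      by_cases h0 : PySem.List.pyGetD cs (k : Int) ' ' = '0'
      · simp [h0]
      · by_cases h1 : PySem.List.pyGetD cs (k : Int) ' ' = '1' <;> simp [h0, h1]
    · have hm' : ¬ ((i % 4 : Nat) : Int) = 0 := by exact_mod_cast hm
      rw [if_neg hm] at hu
      simp only [if_neg hm', hu]
      by_cases h0 : PySem.List.pyGetD cs (k : Int) ' ' = '0'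
      · simp [h0]
      · by_cases h1 : PySem.List.pyGetD cs (k : Int) ' ' = '1' <;> simp [h0, h1]

-- A's loop builds exactly the concatenation of the print-order pieces
lemma korA_fold (cs : List Char) (hlen : cs.length ≤ 49) :
    (PySem.List.pyRange 0 (cs.length : Int) 1).foldl (korStepA cs.reverse (cs.length : Int)) []
      = (PySem.List.enumerate cs 0).flatMap (kPiece cs (cs.length : Int)) := by
  have hA : korStepA cs.reverse (cs.length : Int)
      = fun acc i => korPieceA cs.reverse (cs.length : Int) i ++ acc :=
    funext fun acc => funext fun i => korStepA_eq _ _ _ _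
  rw [hA, foldl_prepend]
  rw [PySem.List.enumerate_eq_map_pyRange (d := ' ')]
  have hlencs : PySem.List.len cs = (cs.length : Int) := by simp [PySem.List.len]
  rw [hlencs, PySem.List.pyRange_zero_nat, List.flatMap_map, List.flatMap_map]
  rw [List.map_map, ← List.map_reverse]
  rw [List.range_eq_range', List.reverse_range']
  rw [List.map_map, ← List.range_eq_range']
  rw [← List.flatMap_def]
  simp only [List.append_nil]
  refine List.flatMap_congr ?_
  intro k hkmem
  have hk : k < cs.length := List.mem_range.mp hkmem
  have := korPiece_agree cs k hk hlen
  simpa using this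

-- unfolding equation for the grouping loop
lemma korGroups_eq (t : List Char) (h : t ≠ []) :
    korGroups t = t.drop (t.length - 4) :: korGroups (t.take (t.length - 4)) := by
  rw [korGroups]
  rw [if_neg h]
  rw [PySem.List.slice_from_neg_ofNat t 4 (by omega), PySem.List.slice_to_neg_ofNat t 4 (by omega)]

-- enumerate with a shifted start is a map over enumerate
lemma korEnum_shift {α : Type} (xs : List α) (a s : Int) :
    PySem.List.enumerate xs (s + a) = (PySem.List.enumerate xs s).map (fun p => (p.1 + a, p.2)) := by
  induction xs generalizing s with
  | nil => simp [PySem.List.enumerate_nil]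
  | cons x t ih =>
    rw [PySem.List.enumerate_cons, PySem.List.enumerate_cons]
    have : s + a + 1 = (s + 1) + a := by ring
    simp [this, ih (s + 1)]

-- the inner piece at local index k matches the print-order piece at global index m-L+k,
-- provided the surrounding group is not one A suppresses
lemma korDigit_agree (cs : List Char) (m g0 L k : Nat) (d : Char)
    (hm : m + 4 * g0 = cs.length) (hm1 : 1 ≤ m) (hL : L = min m 4) (hk : k < L)
    (hns : ¬ (1 ≤ ((g0 : Nat) : Int) ∧ 9 ≤ ((cs.length : Nat) : Int) ∧
              (cs.take m).drop (m - 4) = ['0','0','0','0'])) :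
    iPiece (g0 : Int) (L : Int) ((k : Int), d)
      = kPiece cs (cs.length : Int) (((m - L + k : Nat) : Int), d) := by
  set n := cs.length with hn
  set pos := L - 1 - k with hpos
  have hpos3 : pos ≤ 3 := by omega
  have hidx : ((m - L + k : Nat) : Int) = ((m - 1 - pos : Nat) : Int) := by
    push_cast; omega
  have hiN : (n : Int) - 1 - ((m - L + k : Nat) : Int) = ((4 * g0 + pos : Nat) : Int) := by
    push_cast; omega
  have hmod : PySem.Int.mod ((4 * g0 + pos : Nat) : Int) 4 = ((pos : Nat) : Int) := by
    rw [korModNat]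
    congr 1
    omega
  have hposI : (L : Int) - 1 - (k : Int) = ((pos : Nat) : Int) := by push_cast; omega
  simp only [iPiece, kPiece, hiN, hmod, hposI]
  by_cases hp0 : pos = 0
  · -- group-unit position
    have hskipF : ¬ (9 ≤ (n : Int) ∧ 4 ≤ ((4 * g0 + pos : Nat) : Int) ∧
        ((pos : Nat) : Int) = 0 ∧ 3 ≤ ((m - L + k : Nat) : Int) ∧
        PySem.List.slice cs (some (((m - L + k : Nat) : Int) - 3))
          (some (((m - L + k : Nat) : Int) + 1)) = ['0','0','0','0']) := by
      rintro ⟨h9, h4, -, h3, hsl⟩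
      have hg1 : 1 ≤ g0 := by
        have : (4 : Int) ≤ ((4 * g0 : Nat) : Int) := by simpa [hp0] using h4
        omega
      have hm4 : 4 ≤ m := by
        have : (3 : Int) ≤ ((m - L + k : Nat) : Int) := h3
        omega
      have hseg : (cs.take m).drop (m - 4) = (cs.drop (m - 4)).take 4 := by
        rw [List.drop_take]
        congr 1
        omega
      have hidx1 : ((m - L + k : Nat) : Int) = ((m - 1 : Nat) : Int) := by
        push_cast; omega
      have hsl' : PySem.List.slice cs (some ((m - 4 : Nat) : Int)) (some ((m : Nat) : Int))
          = ['0','0','0','0'] := by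
        have e1 : ((m - L + k : Nat) : Int) - 3 = ((m - 4 : Nat) : Int) := by
          rw [hidx1]; push_cast [hm4]; omega
        have e2 : ((m - L + k : Nat) : Int) + 1 = ((m : Nat) : Int) := by
          rw [hidx1]; push_cast [hm1]; omega
        rw [← e1, ← e2]; exact hsl
      have e3 : PySem.List.slice cs (some ((m - 4 : Nat) : Int)) (some ((m : Nat) : Int))
          = (cs.drop (m - 4)).take 4 := by
        rw [PySem.List.slice_natCast]
        congr 1
        omega
      exact hns ⟨by exact_mod_cast hg1, by omega, by rw [hseg, ← e3, hsl']⟩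
    rw [if_neg hskipF]
    have hdiv : PySem.Int.floordiv ((4 * g0 + pos : Nat) : Int) 4 = ((g0 : Nat) : Int) := by
      rw [korDivNat]
      congr 1
      omega
    simp [hp0, hdiv]
  · -- intra-group position: the i%4=0 conjunct of the skip test is false
    have hpI : ¬ ((pos : Nat) : Int) = 0 := by exact_mod_cast hp0
    have hskipF : ¬ (9 ≤ (n : Int) ∧ 4 ≤ ((4 * g0 + pos : Nat) : Int) ∧
        ((pos : Nat) : Int) = 0 ∧ 3 ≤ ((m - L + k : Nat) : Int) ∧
        PySem.List.slice cs (some (((m - L + k : Nat) : Int) - 3))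
          (some (((m - L + k : Nat) : Int) + 1)) = ['0','0','0','0']) := by
      rintro ⟨-, -, h, -⟩; exact hpI h
    rw [if_neg hskipF]
    simp only [if_neg hpI]

-- one whole group contributes exactly its digits' print-order pieces
lemma korGroup_agree (cs : List Char) (m g0 : Nat)
    (hm : m + 4 * g0 = cs.length) (hm1 : 1 ≤ m) :
    gPiece (cs.length : Int) ((g0 : Int), (cs.take m).drop (m - 4))
      = (PySem.List.enumerate ((cs.take m).drop (m - 4)) ((m - 4 : Nat) : Int)).flatMap
          (kPiece cs (cs.length : Int)) := by
  set seg := (cs.take m).drop (m - 4) with hsegdef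
  have hlt : (cs.take m).length = m := by
    rw [List.length_take]
    omega
  have hL : seg.length = min m 4 := by
    rw [hsegdef, List.length_drop, hlt]
    omega
  by_cases hsk : 1 ≤ ((g0 : Nat) : Int) ∧ 9 ≤ ((cs.length : Nat) : Int) ∧
      seg = ['0','0','0','0']
  · -- the suppressed group: every one of its four pieces is empty
    obtain ⟨hg1, h9, hseg0⟩ := hsk
    have hgP : gPiece (cs.length : Int) ((g0 : Int), seg) = [] := by
      simp only [gPiece]
      rw [if_pos ⟨hg1, h9, hseg0⟩]
    rw [hgP]
    have hm4 : 4 ≤ m := by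
      have : seg.length = 4 := by rw [hseg0]; rfl
      omega
    have hg0 : 1 ≤ g0 := by exact_mod_cast hg1
    have hslice : PySem.List.slice cs (some ((m - 4 : Nat) : Int)) (some ((m : Nat) : Int))
        = ['0','0','0','0'] := by
      rw [PySem.List.slice_natCast, ← hseg0, hsegdef, List.drop_take]
    rw [hseg0]
    rw [PySem.List.enumerate_cons, PySem.List.enumerate_cons, PySem.List.enumerate_cons,
        PySem.List.enumerate_cons, PySem.List.enumerate_nil]
    simp only [List.flatMap_cons, List.flatMap_nil, List.append_nil]
    have hz : ∀ (idx : Int) (j : Nat), j < 3 → idx = ((m - 4 : Nat) : Int) + j →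
        kPiece cs (cs.length : Int) (idx, '0') = [] := by
      intro idx j hj hidx
      subst hidx
      have hiN : (cs.length : Int) - 1 - (((m - 4 : Nat) : Int) + j)
          = ((4 * g0 + (3 - j) : Nat) : Int) := by push_cast; omega
      have hmod : PySem.Int.mod ((4 * g0 + (3 - j) : Nat) : Int) 4 = ((3 - j : Nat) : Int) := by
        rw [korModNat]; congr 1; omega
      have hnz : ¬ ((3 - j : Nat) : Int) = 0 := by omega
      simp only [kPiece, hiN, hmod]
      rw [if_neg (by rintro ⟨-, -, h, -⟩; exact hnz h), if_neg hnz]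
      simp
    have h0 := hz ((m - 4 : Nat) : Int) 0 (by omega) (by push_cast; ring)
    have h1 := hz (((m - 4 : Nat) : Int) + 1) 1 (by omega) (by push_cast; ring)
    have h2 := hz (((m - 4 : Nat) : Int) + 1 + 1) 2 (by omega) (by push_cast; ring)
    have hlast : kPiece cs (cs.length : Int) (((m - 4 : Nat) : Int) + 1 + 1 + 1, '0') = [] := by
      have hiN : (cs.length : Int) - 1 - (((m - 4 : Nat) : Int) + 1 + 1 + 1)
          = ((4 * g0 : Nat) : Int) := by push_cast; omega
      have hmod : PySem.Int.mod ((4 * g0 : Nat) : Int) 4 = 0 := by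
        rw [korModNat]; simp [Nat.mul_mod_right]
      have hsl : PySem.List.slice cs (some ((((m - 4 : Nat) : Int) + 1 + 1 + 1) - 3))
          (some ((((m - 4 : Nat) : Int) + 1 + 1 + 1) + 1)) = ['0','0','0','0'] := by
        have e1 : (((m - 4 : Nat) : Int) + 1 + 1 + 1) - 3 = ((m - 4 : Nat) : Int) := by ring
        have e2 : (((m - 4 : Nat) : Int) + 1 + 1 + 1) + 1 = ((m : Nat) : Int) := by
          push_cast; omega
        rw [e1, e2]; exact hslice
      simp only [kPiece, hiN, hmod]
      rw [if_pos ⟨h9, by push_cast; omega, by trivial, by push_cast; omega, hsl⟩]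
    rw [h0, h1, h2, hlast]
    simp
  · -- an ordinary group: the inner loop is the flatMap of its pieces
    have hgP : gPiece (cs.length : Int) ((g0 : Int), seg) = korGroupRender (g0 : Int) seg := by
      simp only [gPiece]
      rw [if_neg hsk]
    rw [hgP]
    have hstep : korGroupStep (g0 : Int) (seg.length : Int)
        = fun piece p => piece ++ iPiece (g0 : Int) (seg.length : Int) p :=
      funext fun piece => funext fun p => korGroupStep_eq _ _ _ _
    rw [korGroupRender, hstep, PySem.List.foldl_append_eq_flatMap]
    rw [show ((m - 4 : Nat) : Int) = 0 + ((m - 4 : Nat) : Int) by ring, korEnum_shift,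
        List.flatMap_map]
    simp only [List.nil_append]
    refine List.flatMap_congr ?_
    intro p hp
    obtain ⟨k, hk, rfl⟩ := (PySem.List.mem_enumerate_iff _ _ _).mp hp
    have hkk : (0 : Int) + (k : Nat) = ((k : Nat) : Int) := by ring
    have hmain := korDigit_agree cs m g0 seg.length k seg[k] hm hm1 hL hk
      (by simpa using hsk)
    have hsum : ((k : Nat) : Int) + ((m - 4 : Nat) : Int) = ((m - seg.length + k : Nat) : Int) := by
      push_cast
      omega
    simp only [hkk, hsum]
    exact hmain

-- the outer group loop, peeled g0 groups in, equals the print-order pieces of the remaining prefix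
lemma korB_flat (cs : List Char) :
    ∀ m g0 : Nat, (m = 0 ∨ m + 4 * g0 = cs.length) →
    ((PySem.List.enumerate (korGroups (cs.take m)) (g0 : Int)).reverse).flatMap
        (gPiece (cs.length : Int))
      = (PySem.List.enumerate (cs.take m) 0).flatMap (kPiece cs (cs.length : Int)) := by
  intro m
  induction m using Nat.strong_induction_on with
  | _ m ih =>
    intro g0 hm
    rcases Nat.eq_zero_or_pos m with hm0 | hm1
    · subst hm0
      rw [List.take_zero, korGroups, if_pos rfl, PySem.List.enumerate_nil]
      simp
    have hmlen : m + 4 * g0 = cs.length := by omega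
    have hmle : m ≤ cs.length := by omega
    have hlt : (cs.take m).length = m := by rw [List.length_take]; omega
    have hne : cs.take m ≠ [] := by
      intro h
      rw [h] at hlt
      simp at hlt
      omega
    rw [korGroups_eq _ hne, hlt]
    have htt : (cs.take m).take (m - 4) = cs.take (m - 4) := by
      rw [List.take_take]
      congr 1
      omega
    rw [htt, PySem.List.enumerate_cons]
    have hg1 : (g0 : Int) + 1 = ((g0 + 1 : Nat) : Int) := by push_cast; ring
    rw [hg1, List.reverse_cons, List.flatMap_append]
    have hih := ih (m - 4) (by omega) (g0 + 1) (by omega)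
    rw [hih]
    have hga := korGroup_agree cs m g0 hmlen hm1
    simp only [List.flatMap_cons, List.flatMap_nil, List.append_nil]
    rw [hga]
    have hsplit : cs.take m = cs.take (m - 4) ++ (cs.take m).drop (m - 4) := by
      rw [← htt, List.take_append_drop]
    conv_rhs => rw [hsplit]
    rw [PySem.List.enumerate_append, List.flatMap_append]
    have hl4 : (cs.take (m - 4)).length = m - 4 := by rw [List.length_take]; omega
    rw [hl4]
    congr 2
    ring

-- the two programs build the same character list
lemma korMain (cs : List Char) (hlen : cs.length ≤ 49) :
    (PySem.List.pyRange 0 (cs.length : Int) 1).foldl (korStepA cs.reverse (cs.length : Int)) []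
      = PySem.Chars.join []
          (((PySem.List.enumerate (korGroups cs) 0).reverse).foldl
            (korOuterStep (cs.length : Int)) []) := by
  have hstep : korOuterStep (cs.length : Int)
      = fun out p => out ++
          (if 1 ≤ p.1 ∧ 9 ≤ (cs.length : Int) ∧ p.2 = ['0','0','0','0'] then []
           else [korGroupRender p.1 p.2]) :=
    funext fun out => funext fun p => korOuterStep_eq _ _ _
  rw [hstep, PySem.List.foldl_append_eq_flatMap, join_nil_eq_flatten]
  simp only [List.nil_append]
  have hflat : (((PySem.List.enumerate (korGroups cs) 0).reverse).flatMap
      (fun p => if 1 ≤ p.1 ∧ 9 ≤ (cs.length : Int) ∧ p.2 = ['0','0','0','0'] then []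
                else [korGroupRender p.1 p.2])).flatten
      = ((PySem.List.enumerate (korGroups cs) 0).reverse).flatMap
          (gPiece (cs.length : Int)) := by
    induction ((PySem.List.enumerate (korGroups cs) 0).reverse) with
    | nil => simp
    | cons p t iht =>
      simp only [List.flatMap_cons, List.flatten_append, iht, gPiece]
      split_ifs <;> simp_all
  rw [hflat]
  have hB := korB_flat cs cs.length 0 (by omega)
  rw [List.take_length] at hB
  rw [show ((0 : Nat) : Int) = (0 : Int) by rfl] at hB
  rw [hB]
  exact korA_fold cs hlen

-- digit-count bound for the rounded amount
lemma korLen_le (r : Int) (h : r.natAbs < 10 ^ 12) : (PySem.Int.toChars r).length ≤ 13 := by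
  unfold PySem.Int.toChars
  split_ifs with h0
  · simp only [List.length_cons]
    have := (Nat.length_toDigits_le_iff (b := 10) (n := r.natAbs) (k := 12)
      (by norm_num) (by norm_num)).mpr h
    omega
  · have hle : r.toNat < 10 ^ 12 := by omega
    have := (Nat.length_toDigits_le_iff (b := 10) (n := r.toNat) (k := 12)
      (by norm_num) (by norm_num)).mpr hle
    omega

lemma korRound_core_abs (num : Int) (k : Nat) (hk : k ≤ 11) (h : num.natAbs ≤ 2 ^ 31)
    (q' : Int)
    (hq' : q' = PySem.Int.floordiv num (10 ^ k) ∨ q' = PySem.Int.floordiv num (10 ^ k) + 1) :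
    (q' * 10 ^ k).natAbs < 10 ^ 12 := by
  have hm1 : (1 : Int) ≤ 10 ^ k := one_le_pow₀ (by norm_num)
  have hmu : (10 : Int) ^ k ≤ 10 ^ 11 := pow_le_pow_right₀ (by norm_num) hk
  have h0m : (0 : Int) ≤ 10 ^ k := by positivity
  have hfd : PySem.Int.floordiv num (10 ^ k) = num / 10 ^ k := by
    simp [PySem.Int.floordiv, Int.fdiv_eq_ediv, h0m]
  have e1 : num % 10 ^ k = num - 10 ^ k * (num / 10 ^ k) := Int.emod_def num _
  have e2 : 0 ≤ num % 10 ^ k := Int.emod_nonneg _ (by positivity)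
  have e3 : num % 10 ^ k < 10 ^ k := Int.emod_lt_of_pos _ (by positivity)
  have hmc : (10 : Int) ^ k * (num / 10 ^ k) = num / 10 ^ k * 10 ^ k := mul_comm _ _
  rcases hq' with hq | hq <;> rw [hq, hfd]
  · omega
  · rw [add_mul, one_mul]; omega

lemma pvKorRound_bound (num nd : Int) (h : num.natAbs ≤ 2 ^ 31) :
    (pvKorRound num nd).natAbs < 10 ^ 12 := by
  unfold pvKorRound
  by_cases hnd : 0 ≤ nd
  · simp only [if_pos hnd]; omega
  simp only [if_neg hnd]
  split_ifs with h1 h2 h3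
  · exact korRound_core_abs num _ (min_le_right _ _) h _ (Or.inr rfl)
  · exact korRound_core_abs num _ (min_le_right _ _) h _ (Or.inl rfl)
  · exact korRound_core_abs num _ (min_le_right _ _) h _ (Or.inl rfl)
  · exact korRound_core_abs num _ (min_le_right _ _) h _ (Or.inr rfl)

-- ===== VERDICT =====
theorem get_kor_amount_string_spec : Claim_equal_get_kor_amount_string := by
  intro num nd suf hdom hpre
  unfold Spec_get_kor_amount_string get_kor_amount_string get_kor_amount_string_alt
  have hnum : num.natAbs ≤ 2 ^ 31 := by
    simp only [Dom_get_kor_amount_string, pvDomInt, Bool.and_eq_true, decide_eq_true_eq] at hdom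
    omega
  have hlen : (PySem.Int.toChars (pvKorRound num nd)).length ≤ 49 := by
    have := korLen_le (pvKorRound num nd) (pvKorRound_bound num nd hnum)
    omega
  simp only [List.length_reverse]
  rw [korMain _ hlen]
  simp only [List.length_eq_zero_iff]
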